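-- pv_equiv track=rewrite | github.com/jykstudy/DA_Study | 프로그래머스/0/181881. 조건에 맞게 수열 변환하기 2/조건에 맞게 수열 변환하기 2.py | solution
-- ===== SOURCE A (Python) =====
-- def solution(arr):
--     current_arr = arr[:]
--
--     def transform_element(elem):
--         if elem >= 50 and elem % 2 == 0:
--             return elem // 2
--         elif elem < 50 and elem % 2 == 1:
--             return elem * 2 + 1
--         else:
--             return elem
--
--     x = 0
--     seen = {}
--
--     while tuple(current_arr) not in seen:
--         seen[tuple(current_arr)] = x
--         next_arr = [transform_element(elem) for elem in current_arr]
--         current_arr = next_arr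
--         x += 1
--
--     return seen[tuple(current_arr)]
-- ===== SOURCE B (Python) =====
-- def solution(arr):
--     # Answer = number of synchronous steps until the array is a fixed point.
--     # Since the transform acts elementwise, that is the max over elements of
--     # each element's own step count to its fixed point.
--     def steps(e):
--         k = 0
--         while True:
--             if e >= 50 and e % 2 == 0:
--                 nxt = e // 2
--             elif e < 50 and e % 2 == 1:
--                 nxt = e * 2 + 1
--             else:
--                 nxt = e
--             if nxt == e:
--                 return k
--             e = nxt
--             k += 1
--
--     ans = 0
--     for e in arr:
--         ans = max(ans, steps(e))
--     return ans
-- ===== Notes on version B (the rewrite author's own statement) =====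
-- stated objective: alternative
-- what changed: Instead of iterating whole-array states with a dict of seen tuples, B counts for each element independently how many steps it needs to reach its own fixed point and returns the maximum of these counts; correct because the transform acts elementwise, so the array is fixed exactly when every element is.
import Mathlib
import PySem

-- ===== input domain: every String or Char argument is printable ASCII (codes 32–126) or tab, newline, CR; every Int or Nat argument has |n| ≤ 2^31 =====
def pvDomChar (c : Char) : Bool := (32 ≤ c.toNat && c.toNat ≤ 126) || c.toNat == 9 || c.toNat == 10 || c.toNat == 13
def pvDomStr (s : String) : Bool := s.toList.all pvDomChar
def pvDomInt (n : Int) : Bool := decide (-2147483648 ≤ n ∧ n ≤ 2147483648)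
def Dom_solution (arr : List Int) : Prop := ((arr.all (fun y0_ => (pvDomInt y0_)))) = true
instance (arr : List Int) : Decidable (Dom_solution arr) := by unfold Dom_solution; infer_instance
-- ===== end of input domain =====

-- B replaces whole-array iteration with a seen-dict by per-element step counts combined with max; objective: alternative.
-- Both Pythons loop forever when some element is odd and < -1 (it then diverges to -∞); Pre_ excludes exactly those inputs.

-- shared per-element transform (identical helper in A's and B's Python)
def transformElement (elem : Int) : Int :=
  if 50 ≤ elem ∧ PySem.Int.mod elem 2 = 0 then PySem.Int.floordiv elem 2
  else if elem < 50 ∧ PySem.Int.mod elem 2 = 1 then elem * 2 + 1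
  else elem

-- termination measure for the fuelled loops: bound on steps-to-fixed-point per element
def mElem (e : Int) : Nat :=
  if 50 ≤ e ∧ PySem.Int.mod e 2 = 0 then (e + 64).toNat
  else if PySem.Int.mod e 2 = 1 ∧ 1 ≤ e ∧ e < 50 then (50 - e).toNat
  else 0

def mArr (arr : List Int) : Nat := (arr.map mElem).sum

-- ===== PORT A =====
def loopA : Nat → PySem.Dict (List Int) Int → List Int → Int → Int
  | 0, _, _, _ => 0   -- fuel exhaustion; unreachable under Pre_solution
  | f + 1, seen, cur, x =>
      if seen.contains cur then (seen.get? cur).getD 0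
      else loopA f (seen.insert cur x) (cur.map transformElement) (x + 1)

def solution (arr : List Int) : Int :=
  loopA (mArr arr + 2) PySem.Dict.empty arr 0

-- ===== PORT B =====
-- per-element 'steps' loop of Source B, fuelled; k is the Python counter
def stepsElem : Nat → Int → Int → Int
  | 0, _, k => k   -- fuel exhaustion; unreachable under Pre_solution
  | f + 1, e, k =>
      let nxt := transformElement e
      if nxt = e then k else stepsElem f nxt (k + 1)

def solution_alt (arr : List Int) : Int :=
  arr.foldl (fun ans e => max ans (stepsElem (mElem e + 1) e 0)) 0

-- ===== PRECONDITION & SPEC =====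
-- Pre_ excludes arrays containing an element that is odd and < -1: on those BOTH Pythons loop forever
-- (the element diverges to -∞), so A never returns there.
def Pre_solution (arr : List Int) : Prop := ∀ e ∈ arr, -1 ≤ e ∨ PySem.Int.mod e 2 = 0
instance (arr : List Int) : Decidable (Pre_solution arr) := by unfold Pre_solution; infer_instance
def pvWitness_solution : List Int := [2, 49, 51, -1, 100]
def Spec_solution (arr : List Int) (out : Int) : Prop := out = solution_alt arr
instance (arr : List Int) (out : Int) : Decidable (Spec_solution arr out) := by unfold Spec_solution; infer_instance

-- ===== CLAIM (what is proved, stated in full; the proofs are below) =====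
def Claim_equal_solution : Prop := ∀ (arr : List Int), Dom_solution arr → Pre_solution arr → Spec_solution arr (solution arr)

-- ===== LEMMAS AND PROOFS =====

def allowed (e : Int) : Prop := -1 ≤ e ∨ PySem.Int.mod e 2 = 0

lemma mod_two_cases (e : Int) : PySem.Int.mod e 2 = e % 2 :=
  PySem.Int.mod_eq_emod_of_pos (by norm_num)

lemma fdiv_two (e : Int) : PySem.Int.floordiv e 2 = e / 2 :=
  PySem.Int.floordiv_eq_ediv_of_pos (by norm_num)

lemma allowed_transform {e : Int} (h : allowed e) : allowed (transformElement e) := by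
  unfold allowed at *
  unfold transformElement
  simp only [mod_two_cases, fdiv_two] at *
  split_ifs <;> omega

lemma mElem_transform_le {e : Int} (h : allowed e) :
    mElem (transformElement e) ≤ mElem e ∧ (transformElement e ≠ e → mElem (transformElement e) < mElem e) := by
  unfold allowed at h
  unfold transformElement mElem
  simp only [mod_two_cases, fdiv_two] at *
  split_ifs <;> constructor <;> intros <;> omega

def allowedList (arr : List Int) : Prop := ∀ e ∈ arr, allowed e

lemma allowedList_step {arr : List Int} (h : allowedList arr) :
    allowedList (arr.map transformElement) := by
  intro e he
  rcases List.mem_map.mp he with ⟨a, ha, rfl⟩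
  exact allowed_transform (h a ha)

lemma mArr_step {arr : List Int} (h : allowedList arr) :
    mArr (arr.map transformElement) ≤ mArr arr ∧
      (arr.map transformElement ≠ arr → mArr (arr.map transformElement) < mArr arr) := by
  induction arr with
  | nil => simp [mArr]
  | cons a l ih =>
    have ha : allowed a := h a (List.mem_cons_self)
    have hl : allowedList l := fun e he => h e (List.mem_cons_of_mem _ he)
    have hma := mElem_transform_le ha
    have ihl := ih hl
    simp only [List.map, mArr, List.sum_cons] at *
    constructor
    · omega
    · intro hne
      by_cases hta : transformElement a = a
      · have : l.map transformElement ≠ l := by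
          intro hh; exact hne (by rw [hta, hh])
        have := ihl.2 this
        omega
      · have := hma.2 hta
        omega

-- the measure is nonincreasing along any number of steps
lemma mArr_iterate_le {arr : List Int} (h : allowedList arr) (k : Nat) :
    mArr ((fun l => l.map transformElement)^[k] arr) ≤ mArr arr ∧
      allowedList ((fun l => l.map transformElement)^[k] arr) := by
  induction k with
  | zero => rw [Function.iterate_zero_apply]; exact ⟨le_refl _, h⟩
  | succ n ih =>
    rw [Function.iterate_succ_apply']
    exact ⟨le_trans (mArr_step ih.2).1 ih.1, allowedList_step ih.2⟩

-- a strictly-later state never equals a non-fixed current state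
lemma later_ne {arr : List Int} (h : allowedList arr)
    (hnf : arr.map transformElement ≠ arr) (k : Nat) :
    (fun l => l.map transformElement)^[k] (arr.map transformElement) ≠ arr := by
  intro heq
  have h1 := (mArr_step h).2 hnf
  have h2 := (mArr_iterate_le (allowedList_step h) k).1
  rw [heq] at h2
  omega

-- proof-side intermediate: number of synchronous steps to the array's fixed point
def stepsArr : Nat → List Int → Int
  | 0, _ => 0
  | f + 1, cur =>
      if cur.map transformElement = cur then 0 else 1 + stepsArr f (cur.map transformElement)

lemma stepsArr_succ (f : Nat) (cur : List Int) :
    stepsArr (f + 1) cur = if cur.map transformElement = cur then 0 else 1 + stepsArr f (cur.map transformElement) := rfl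

-- A's loop returns x + (steps to fixed point), provided nothing on the forward trajectory is in seen
lemma loopA_spec (n : Nat) : ∀ (cur : List Int), mArr cur ≤ n → allowedList cur →
    ∀ (seen : PySem.Dict (List Int) Int) (x : Int) (fa fb : Nat),
      mArr cur + 2 ≤ fa → mArr cur + 1 ≤ fb →
      (∀ k : Nat, seen.contains ((fun l => l.map transformElement)^[k] cur) = false) →
      loopA fa seen cur x = x + stepsArr fb cur := by
  induction n with
  | zero =>
    intro cur hm hall seen x fa fb hfa hfb hseen
    obtain ⟨fa', rfl⟩ : ∃ fa', fa = fa' + 1 := ⟨fa - 1, by omega⟩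
    obtain ⟨fb', rfl⟩ : ∃ fb', fb = fb' + 1 := ⟨fb - 1, by omega⟩
    have hc0 := hseen 0
    simp only [Function.iterate_zero, id] at hc0
    by_cases hfix : cur.map transformElement = cur
    · obtain ⟨fa'', rfl⟩ : ∃ fa'', fa' = fa'' + 1 := ⟨fa' - 1, by omega⟩
      simp only [loopA, stepsArr, hc0, hfix]
      simp [PySem.Dict.contains_insert_self, PySem.Dict.get?_insert_self]
    · exfalso
      have := (mArr_step hall).2 hfix
      omega
  | succ n ih =>
    intro cur hm hall seen x fa fb hfa hfb hseen
    obtain ⟨fa', rfl⟩ : ∃ fa', fa = fa' + 1 := ⟨fa - 1, by omega⟩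
    obtain ⟨fb', rfl⟩ : ∃ fb', fb = fb' + 1 := ⟨fb - 1, by omega⟩
    have hc0 := hseen 0
    simp only [Function.iterate_zero, id] at hc0
    by_cases hfix : cur.map transformElement = cur
    · obtain ⟨fa'', rfl⟩ : ∃ fa'', fa' = fa'' + 1 := ⟨fa' - 1, by omega⟩
      simp only [loopA, stepsArr, hc0, hfix]
      simp [PySem.Dict.contains_insert_self, PySem.Dict.get?_insert_self]
    · have hlt := (mArr_step hall).2 hfix
      simp only [loopA, stepsArr, hc0, Bool.false_eq_true, if_false, hfix]
      rw [ih (cur.map transformElement) (by omega) (allowedList_step hall) _ _ _ fb' (by omega) (by omega)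
        (by
          intro k
          have hne : (fun l => l.map transformElement)^[k] (cur.map transformElement) ≠ cur :=
            later_ne hall hfix k
          rw [PySem.Dict.contains_insert]
          have hs := hseen (k + 1)
          rw [Function.iterate_succ_apply] at hs
          simp [hs, hne])]
      ring

-- ===== element-level facts about stepsElem =====

lemma stepsElem_acc : ∀ (f : Nat) (e k : Int), stepsElem f e k = k + stepsElem f e 0 := by
  intro f
  induction f with
  | zero => intro e k; simp [stepsElem]
  | succ f ih =>
    intro e k
    simp only [stepsElem]
    by_cases h : transformElement e = e
    · simp [h]
    · simp only [h, if_false]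
      rw [ih (transformElement e) (k + 1), ih (transformElement e) (0 + 1)]
      ring

lemma stepsElem_nonneg : ∀ (f : Nat) (e : Int), 0 ≤ stepsElem f e 0 := by
  intro f
  induction f with
  | zero => intro e; simp [stepsElem]
  | succ f ih =>
    intro e
    simp only [stepsElem]
    by_cases h : transformElement e = e
    · simp [h]
    · simp only [h, if_false]
      rw [stepsElem_acc]
      have := ih (transformElement e)
      omega

lemma stepsElem_fuel (n : Nat) : ∀ (e : Int), allowed e → mElem e ≤ n →
    ∀ (f f' : Nat), mElem e + 1 ≤ f → mElem e + 1 ≤ f' → stepsElem f e 0 = stepsElem f' e 0 := by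
  induction n with
  | zero =>
    intro e ha hm f f' hf hf'
    obtain ⟨f1, rfl⟩ : ∃ f1, f = f1 + 1 := ⟨f - 1, by omega⟩
    obtain ⟨f1', rfl⟩ : ∃ f1', f' = f1' + 1 := ⟨f' - 1, by omega⟩
    by_cases h : transformElement e = e
    · simp [stepsElem, h]
    · exfalso
      have := (mElem_transform_le ha).2 h
      omega
  | succ n ih =>
    intro e ha hm f f' hf hf'
    obtain ⟨f1, rfl⟩ : ∃ f1, f = f1 + 1 := ⟨f - 1, by omega⟩
    obtain ⟨f1', rfl⟩ : ∃ f1', f' = f1' + 1 := ⟨f' - 1, by omega⟩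
    by_cases h : transformElement e = e
    · simp [stepsElem, h]
    · have hlt := (mElem_transform_le ha).2 h
      simp only [stepsElem, h, if_false]
      rw [stepsElem_acc f1, stepsElem_acc f1']
      rw [ih (transformElement e) (allowed_transform ha) (by omega) f1 f1' (by omega) (by omega)]

-- Source B's steps(e), with its natural fuel
def SE (e : Int) : Int := stepsElem (mElem e + 1) e 0

lemma SE_fixed {e : Int} (h : transformElement e = e) : SE e = 0 := by
  simp [SE, stepsElem, h]

lemma stepsElem_succ (f : Nat) (e k : Int) :
    stepsElem (f + 1) e k = if transformElement e = e then k else stepsElem f (transformElement e) (k + 1) := rfl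

lemma SE_unfold {e : Int} (ha : allowed e) (h : transformElement e ≠ e) :
    SE e = 1 + SE (transformElement e) := by
  have hlt := (mElem_transform_le ha).2 h
  unfold SE
  rw [stepsElem_succ, if_neg h, stepsElem_acc]
  rw [stepsElem_fuel (mElem (transformElement e)) (transformElement e) (allowed_transform ha)
    (le_refl _) (mElem e) (mElem (transformElement e) + 1) (by omega) (by omega)]
  ring

lemma map_eq_self_iff {l : List Int} (h : l.map transformElement = l) :
    ∀ e ∈ l, transformElement e = e := by
  induction l with
  | nil => intro e he; cases he
  | cons a t ih =>
    simp only [List.map_cons, List.cons.injEq] at h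
    intro e he
    rcases List.mem_cons.mp he with rfl | he
    · exact h.1
    · exact ih h.2 e he

-- ===== folding max over per-element counts =====

lemma foldl_max_all_zero {l : List Int} (h : ∀ e ∈ l, SE e = 0) :
    l.foldl (fun ans e => max ans (SE e)) 0 = 0 := by
  induction l with
  | nil => rfl
  | cons a t ih =>
    simp only [List.foldl_cons]
    rw [h a List.mem_cons_self]
    simp only [max_self]
    exact ih (fun e he => h e (List.mem_cons_of_mem _ he))

lemma foldl_max_shift : ∀ (l : List Int), allowedList l →
    ∀ (a b : Int), 0 ≤ b → a = 1 + b →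
    l.foldl (fun ans e => max ans (SE e)) a = 1 + l.foldl (fun ans e => max ans (SE (transformElement e))) b := by
  intro l
  induction l with
  | nil => intro _ a b _ hab; simpa using hab
  | cons e t ih =>
    intro hall a b hb hab
    have he : allowed e := hall e List.mem_cons_self
    have ht : allowedList t := fun x hx => hall x (List.mem_cons_of_mem _ hx)
    simp only [List.foldl_cons]
    by_cases hfix : transformElement e = e
    · have h0 : SE e = 0 := SE_fixed hfix
      have h0' : SE (transformElement e) = 0 := by rw [hfix]; exact h0
      rw [h0, h0']
      apply ih ht _ _ (le_max_of_le_left hb)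
      rw [hab]; omega
    · have hse : SE e = 1 + SE (transformElement e) := SE_unfold he hfix
      have hnn : 0 ≤ SE (transformElement e) := stepsElem_nonneg _ _
      apply ih ht _ _ (le_max_of_le_right hnn)
      rw [hse, hab]
      omega

lemma foldl_max_step : ∀ (l : List Int), allowedList l → l.map transformElement ≠ l →
    l.foldl (fun ans e => max ans (SE e)) 0 = 1 + l.foldl (fun ans e => max ans (SE (transformElement e))) 0 := by
  intro l
  induction l with
  | nil => intro _ h; simp at h
  | cons e t ih =>
    intro hall hne
    have he : allowed e := hall e List.mem_cons_self
    have ht : allowedList t := fun x hx => hall x (List.mem_cons_of_mem _ hx)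
    simp only [List.foldl_cons]
    by_cases hfix : transformElement e = e
    · have h0 : SE e = 0 := SE_fixed hfix
      have h0' : SE (transformElement e) = 0 := by rw [hfix]; exact h0
      rw [h0, h0']
      simp only [max_self]
      apply ih ht
      intro hh
      exact hne (by simp [List.map_cons, hfix, hh])
    · have hse : SE e = 1 + SE (transformElement e) := SE_unfold he hfix
      have hnn : 0 ≤ SE (transformElement e) := stepsElem_nonneg _ _
      apply foldl_max_shift t ht _ _ (le_max_of_le_right hnn)
      rw [hse]
      omega

-- the synchronous step count equals the max of per-element step counts
lemma stepsArr_eq_max (n : Nat) : ∀ (cur : List Int), mArr cur ≤ n → allowedList cur →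
    ∀ (f : Nat), mArr cur + 1 ≤ f →
    stepsArr f cur = cur.foldl (fun ans e => max ans (SE e)) 0 := by
  induction n with
  | zero =>
    intro cur hm hall f hf
    obtain ⟨f1, rfl⟩ : ∃ f1, f = f1 + 1 := ⟨f - 1, by omega⟩
    by_cases hfix : cur.map transformElement = cur
    · rw [stepsArr_succ, if_pos hfix,
        foldl_max_all_zero (fun e he => SE_fixed (map_eq_self_iff hfix e he))]
    · exfalso
      have := (mArr_step hall).2 hfix
      omega
  | succ n ih =>
    intro cur hm hall f hf
    obtain ⟨f1, rfl⟩ : ∃ f1, f = f1 + 1 := ⟨f - 1, by omega⟩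
    by_cases hfix : cur.map transformElement = cur
    · rw [stepsArr_succ, if_pos hfix,
        foldl_max_all_zero (fun e he => SE_fixed (map_eq_self_iff hfix e he))]
    · have hlt := (mArr_step hall).2 hfix
      rw [stepsArr_succ, if_neg hfix]
      rw [ih (cur.map transformElement) (by omega) (allowedList_step hall) f1 (by omega)]
      rw [foldl_max_step cur hall hfix]
      congr 1
      rw [List.foldl_map]

-- ===== VERDICT (by name: the statement is the Claim_ definition above) =====
theorem solution_spec : Claim_equal_solution := by
  intro arr _ hpre
  unfold Spec_solution solution solution_alt
  rw [loopA_spec (mArr arr) arr (le_refl _) hpre PySem.Dict.empty 0 _ (mArr arr + 1) (le_refl _) (le_refl _)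
    (fun k => PySem.Dict.contains_empty _)]
  rw [stepsArr_eq_max (mArr arr) arr (le_refl _) hpre _ (le_refl _)]
  simp only [SE]
  ring
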